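-- pv_equiv track=rewrite | github.com/magicat777/fp-analysis | fp_analyzer.py | parse_journal_markdown
-- ===== SOURCE A (Python) =====
-- def parse_journal_markdown(content):
--     """Parse a journal markdown entry into structured sections."""
--     sections = {}
--     current_section = None
--     current_lines = []
--
--     for line in content.split("\n"):
--         if line.startswith("## "):
--             if current_section:
--                 sections[current_section] = "\n".join(current_lines).strip()
--             current_section = line[3:].strip()
--             current_lines = []
--         elif current_section:
--             current_lines.append(line)
--
--     if current_section:
--         sections[current_section] = "\n".join(current_lines).strip()
--
--     # Extract header metadata
--     meta = {}
--     for line in content.split("\n"):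
--         if line.startswith("**Date:**"):
--             meta["date"] = line.split("**Date:**")[1].strip()
--         elif line.startswith("**Level:**"):
--             meta["level"] = line.split("**Level:**")[1].strip()
--         elif line.startswith("**Location Level:**"):
--             meta["location_level"] = line.split("**Location Level:**")[1].strip()
--         elif line.startswith("# Session:"):
--             meta["title"] = line.split("# Session:")[1].strip()
--
--     return {"meta": meta, "sections": sections}
-- ===== SOURCE B (Python) =====
-- def parse_journal_markdown(content):
--     """Parse a journal markdown entry in ONE pass: section state machine plus a
--     table-driven metadata scan, instead of two separate loops over the lines."""
--     META_PREFIXES = [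
--         ("**Date:**", "date"),
--         ("**Level:**", "level"),
--         ("**Location Level:**", "location_level"),
--         ("# Session:", "title"),
--     ]
--     sections = {}
--     meta = {}
--     current_section = None
--     current_lines = []
--     for line in content.split("\n"):
--         if line.startswith("## "):
--             if current_section:
--                 sections[current_section] = "\n".join(current_lines).strip()
--             current_section = line[3:].strip()
--             current_lines = []
--         else:
--             if current_section:
--                 current_lines.append(line)
--             for prefix, key in META_PREFIXES:
--                 if line.startswith(prefix):
--                     meta[key] = line.split(prefix)[1].strip()
--                     break
--     if current_section:
--         sections[current_section] = "\n".join(current_lines).strip()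
--     return {"meta": meta, "sections": sections}
-- ===== Notes on version B (the rewrite author's own statement) =====
-- stated objective: alternative
-- what changed: B fuses A's two separate passes over the split lines (section state machine, then metadata elif-chain) into a single pass in which a table of (prefix, key) pairs drives the metadata extraction with a break on first match.
import Mathlib
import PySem

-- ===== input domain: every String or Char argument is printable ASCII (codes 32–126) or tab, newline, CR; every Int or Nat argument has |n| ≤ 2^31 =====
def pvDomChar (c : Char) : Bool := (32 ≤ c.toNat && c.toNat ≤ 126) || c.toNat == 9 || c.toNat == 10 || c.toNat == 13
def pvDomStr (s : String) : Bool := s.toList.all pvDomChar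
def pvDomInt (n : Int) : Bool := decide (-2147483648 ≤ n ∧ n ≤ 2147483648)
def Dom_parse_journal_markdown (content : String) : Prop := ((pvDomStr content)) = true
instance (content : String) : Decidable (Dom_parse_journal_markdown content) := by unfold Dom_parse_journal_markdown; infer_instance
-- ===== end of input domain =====

-- B fuses A's two passes over the split lines into a single pass with a
-- table-driven metadata scan (objective: simpler/alternative decomposition, same O(n)).
-- Both dicts map to their insertion-ordered items lists.

-- ===== PORT A =====

-- Python truthiness of `current_section` (None or a string)
def pvTruthy (c : Option String) : Bool :=
  match c with
  | none => false
  | some s => !(s == "")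

-- content.split("\n") — sep is the non-empty "\n", so split? never returns none
def pvSplitLines (content : String) : List String :=
  (PySem.Str.split? content "\n").getD []

-- one iteration of A's first (section) loop
def pvSecStep (st : PySem.Dict String String × Option String × List String)
    (line : String) : PySem.Dict String String × Option String × List String :=
  let (sections, cur, curLines) := st
  if PySem.Str.startswith line "## " then
    let sections := if pvTruthy cur then
        sections.insert (cur.getD "") (PySem.Str.strip (PySem.Str.join "\n" curLines))
      else sections
    (sections, some (PySem.Str.strip (PySem.Str.slice line (some 3) none)), [])
  else if pvTruthy cur then (sections, cur, curLines ++ [line])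
  else (sections, cur, curLines)

-- line.split(pre)[1].strip() — under the startswith guard the split has ≥ 2 parts,
-- so the [1] index never raises; pre is non-empty so split? never returns none
def pvSplitSecond (line pre : String) : String :=
  PySem.Str.strip (PySem.List.pyGetD ((PySem.Str.split? line pre).getD []) 1 "")

-- one iteration of A's second (metadata) loop: the elif chain
def pvMetaStep (md : PySem.Dict String String) (line : String) :
    PySem.Dict String String :=
  if PySem.Str.startswith line "**Date:**" then
    md.insert "date" (pvSplitSecond line "**Date:**")
  else if PySem.Str.startswith line "**Level:**" then
    md.insert "level" (pvSplitSecond line "**Level:**")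
  else if PySem.Str.startswith line "**Location Level:**" then
    md.insert "location_level" (pvSplitSecond line "**Location Level:**")
  else if PySem.Str.startswith line "# Session:" then
    md.insert "title" (pvSplitSecond line "# Session:")
  else md

def parse_journal_markdown (content : String) : List (String × List (String × String)) :=
  let lines := pvSplitLines content
  let st := lines.foldl pvSecStep (PySem.Dict.empty, none, [])
  let sections := if pvTruthy st.2.1 then
      st.1.insert (st.2.1.getD "") (PySem.Str.strip (PySem.Str.join "\n" st.2.2))
    else st.1
  let md := lines.foldl pvMetaStep PySem.Dict.empty
  [("meta", md.items), ("sections", sections.items)]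

-- ===== PORT B =====

def pvMetaPrefixes : List (String × String) :=
  [("**Date:**", "date"), ("**Level:**", "level"),
   ("**Location Level:**", "location_level"), ("# Session:", "title")]

-- B's inner `for prefix, key in META_PREFIXES: if line.startswith(prefix): …; break`
def pvMetaApply (md : PySem.Dict String String) (line : String) :
    List (String × String) → PySem.Dict String String
  | [] => md
  | (pre, key) :: rest =>
    if PySem.Str.startswith line pre then
      md.insert key (pvSplitSecond line pre)
    else pvMetaApply md line rest

-- one iteration of B's single fused loop
def pvFusedStep
    (st : PySem.Dict String String × PySem.Dict String String × Option String × List String)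
    (line : String) :
    PySem.Dict String String × PySem.Dict String String × Option String × List String :=
  let (sections, md, cur, curLines) := st
  if PySem.Str.startswith line "## " then
    let sections := if pvTruthy cur then
        sections.insert (cur.getD "") (PySem.Str.strip (PySem.Str.join "\n" curLines))
      else sections
    (sections, md, some (PySem.Str.strip (PySem.Str.slice line (some 3) none)), [])
  else
    let curLines := if pvTruthy cur then curLines ++ [line] else curLines
    (sections, pvMetaApply md line pvMetaPrefixes, cur, curLines)

def parse_journal_markdown_alt (content : String) : List (String × List (String × String)) :=
  let st := (pvSplitLines content).foldl pvFusedStep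
    (PySem.Dict.empty, PySem.Dict.empty, none, [])
  let sections := if pvTruthy st.2.2.1 then
      st.1.insert (st.2.2.1.getD "") (PySem.Str.strip (PySem.Str.join "\n" st.2.2.2))
    else st.1
  [("meta", st.2.1.items), ("sections", sections.items)]

-- ===== PRECONDITION & SPEC =====
def Spec_parse_journal_markdown (content : String) (out : List (String × List (String × String))) : Prop := out = parse_journal_markdown_alt content
instance (content : String) (out : List (String × List (String × String))) : Decidable (Spec_parse_journal_markdown content out) := by unfold Spec_parse_journal_markdown; infer_instance

-- ===== CLAIM (what is proved, stated in full; the proofs are below) =====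
def Claim_equal_parse_journal_markdown : Prop := ∀ (content : String), Dom_parse_journal_markdown content → Spec_parse_journal_markdown content (parse_journal_markdown content)

-- ===== LEMMAS AND PROOFS =====

-- B's prefix-table loop is A's elif chain
lemma pvMetaApply_eq (md : PySem.Dict String String) (line : String) :
    pvMetaApply md line pvMetaPrefixes = pvMetaStep md line := rfl

-- a "## " line matches none of the four metadata prefixes
lemma pvMetaStep_hash (md : PySem.Dict String String) (line : String)
    (h : PySem.Str.startswith line "## " = true) : pvMetaStep md line = md := by
  rw [PySem.Str.startswith_eq] at h
  obtain ⟨t, ht⟩ := (PySem.Chars.startswith_iff _ _).mp h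
  have hlist : line.toList = '#' :: '#' :: ' ' :: t := by
    simpa using ht.symm
  unfold pvMetaStep
  simp [PySem.Str.startswith_eq, PySem.Chars.startswith, hlist, List.isPrefixOf]

-- one fused step is the section step paired with the metadata step
lemma pvFusedStep_eq (s m : PySem.Dict String String) (c : Option String)
    (b : List String) (line : String) :
    pvFusedStep (s, m, c, b) line =
      ((pvSecStep (s, c, b) line).1, pvMetaStep m line, (pvSecStep (s, c, b) line).2) := by
  by_cases h : PySem.Str.startswith line "## " = true
  · have h' : PySem.Chars.startswith line.toList ['#', '#', ' '] = true := by simpa using h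
    simp [pvFusedStep, pvSecStep, h', pvMetaStep_hash m line h]
  · have h' : ¬ PySem.Chars.startswith line.toList ['#', '#', ' '] = true := by simpa using h
    by_cases hc : pvTruthy c = true <;>
      simp [pvFusedStep, pvSecStep, h', hc, pvMetaApply_eq]

-- the fused fold is the pair of A's two folds
lemma pvFused_fold (ls : List String) (s m : PySem.Dict String String)
    (c : Option String) (b : List String) :
    ls.foldl pvFusedStep (s, m, c, b) =
      ((ls.foldl pvSecStep (s, c, b)).1, ls.foldl pvMetaStep m,
       (ls.foldl pvSecStep (s, c, b)).2) := by
  induction ls generalizing s m c b with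
  | nil => rfl
  | cons l ls ih =>
    simp only [List.foldl_cons, pvFusedStep_eq]
    rcases hx : pvSecStep (s, c, b) l with ⟨s', c', b'⟩
    simp [ih s' (pvMetaStep m l) c' b']

-- ===== VERDICT (by name: the statement is the Claim_ definition above) =====
theorem parse_journal_markdown_spec : Claim_equal_parse_journal_markdown := by
  intro content _
  unfold Spec_parse_journal_markdown parse_journal_markdown parse_journal_markdown_alt
  rw [pvFused_fold]
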